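-- pv_equiv track=rewrite | github.com/DenisMaksakov/ya_algorithm_training | 2021_1/1_complexity_testing_edge_cases/E_code.py | optimize_flats_per_floor_search
-- ===== SOURCE A (Python) =====
-- from typing import List, Tuple, Optional, Set
--
-- def optimize_flats_per_floor_search(K2: int, P2: int, N2: int, M: int) -> List[int]:
--     """
--     Оптимизированный поиск возможных значений квартир на этаже.
--     Вместо перебора всех значений до max(K2, 10^6) используем математические ограничения.
--
--     Args:
--         K2: номер известной квартиры
--         P2: известный подъезд
--         N2: известный этаж
--         M: количество этажей в доме
--
--     Returns:
--         Список возможных значений квартир на этаже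
--     """
--     if N2 > M:
--         return []
--
--     target_floor_position = (P2 - 1) * M + N2
--
--     # Выводим границы для xi из условия:
--     # (target_floor_position - 1) * xi < K2 ≤ target_floor_position * xi
--
--     min_xi = (K2 - 1) // target_floor_position + 1
--     max_xi = K2 // (target_floor_position - 1) if target_floor_position > 1 else 10 ** 6
--
--     # Учитываем, что xi должно быть целым положительным числом
--     min_xi = max(1, min_xi)
--     max_xi = min(max_xi, 10 ** 6)
--
--     possible_xi_values = []
--
--     for xi in range(min_xi, max_xi + 1):
--         calculated_floor = (K2 + xi - 1) // xi
--         if calculated_floor == target_floor_position: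
--             possible_xi_values.append(xi)
--
--     return possible_xi_values
-- ===== SOURCE B (Python) =====
-- def _solve_ge(c, d):
--     """Interval of integers x within [1, 10**6] satisfying c*x >= d."""
--     if c > 0:
--         return -(-d // c), 10**6
--     if c < 0:
--         return 1, d // c
--     return (1, 10**6) if d <= 0 else (1, 0)
--
--
-- def optimize_flats_per_floor_search(K2, P2, N2, M):
--     if N2 > M:
--         return []
--     target = (P2 - 1) * M + N2
--     # xi is valid iff ceil(K2 / xi) == target, i.e.
--     # target * xi >= K2  and  (target - 1) * xi <= K2 - 1.
--     lo1, hi1 = _solve_ge(target, K2)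
--     lo2, hi2 = _solve_ge(-(target - 1), -(K2 - 1))
--     lo = max(1, lo1, lo2)
--     hi = min(10**6, hi1, hi2)
--     return list(range(lo, hi + 1))
-- ===== Notes on version B (the rewrite author's own statement) =====
-- stated objective: alternative
-- what changed: Replaces A's loop that tests the ceiling division for every candidate xi with a direct solution of the two linear inequalities target*xi >= K2 and (target-1)*xi <= K2-1 via a small interval helper, returning the resulting range; Pre_ restricts to the task's natural domain where the target floor position is positive (or N2 > M): at target 0 A raises ZeroDivisionError, and for negative target positions (meaningless for the apartment problem) A's search window, derived assuming a positive target, can miss valid xi.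
-- outside the precondition, e.g. on optimize_flats_per_floor_search(-10, 1, -3, 0): A returns [], B returns [3]; on optimize_flats_per_floor_search(1, 1, 0, 0): A raises ZeroDivisionError, B returns []
-- crash fix: When N2 <= M and (P2-1)*M + N2 == 0, A raises ZeroDivisionError ('//' by zero); B returns the solution of the inequalities there (e.g. [] for K2 = 1). — e.g. on optimize_flats_per_floor_search(1, 1, 0, 0): A raises ZeroDivisionError, B returns []
import Mathlib
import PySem

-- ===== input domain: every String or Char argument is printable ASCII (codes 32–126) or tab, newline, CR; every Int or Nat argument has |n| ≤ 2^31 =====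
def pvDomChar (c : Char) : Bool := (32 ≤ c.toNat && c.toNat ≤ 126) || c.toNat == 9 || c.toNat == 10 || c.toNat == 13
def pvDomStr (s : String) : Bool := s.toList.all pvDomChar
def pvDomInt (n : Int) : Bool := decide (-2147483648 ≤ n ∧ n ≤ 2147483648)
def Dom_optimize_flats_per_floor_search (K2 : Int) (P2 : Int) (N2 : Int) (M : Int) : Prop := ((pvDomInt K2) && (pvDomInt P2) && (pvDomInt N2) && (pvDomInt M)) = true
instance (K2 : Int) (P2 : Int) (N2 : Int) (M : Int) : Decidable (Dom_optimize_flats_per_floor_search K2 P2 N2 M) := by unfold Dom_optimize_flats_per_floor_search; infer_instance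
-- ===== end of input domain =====

-- B replaces A's candidate loop by directly solving the two linear inequalities for xi (objective: alternative).

-- ===== PORT A =====
def optimize_flats_per_floor_search (K2 : Int) (P2 : Int) (N2 : Int) (M : Int) : List Int :=
  if N2 > M then []
  else
    let target := (P2 - 1) * M + N2
    let min_xi := PySem.Int.floordiv (K2 - 1) target + 1
    let max_xi := if target > 1 then PySem.Int.floordiv K2 (target - 1) else 10 ^ 6
    let min_xi := max 1 min_xi
    let max_xi := min max_xi (10 ^ 6)
    (PySem.List.pyRange min_xi (max_xi + 1) 1).foldl
      (fun acc xi =>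
        if PySem.Int.floordiv (K2 + xi - 1) xi == target then acc ++ [xi] else acc) []

-- ===== PORT B =====
-- interval of integers x within [1, 10^6] satisfying c*x >= d  (Source B's _solve_ge)
def pvSolveGe (c : Int) (d : Int) : Int × Int :=
  if c > 0 then (-(PySem.Int.floordiv (-d) c), 10 ^ 6)
  else if c < 0 then (1, PySem.Int.floordiv d c)
  else if d ≤ 0 then (1, 10 ^ 6) else (1, 0)

def optimize_flats_per_floor_search_alt (K2 : Int) (P2 : Int) (N2 : Int) (M : Int) : List Int :=
  if N2 > M then []
  else
    let target := (P2 - 1) * M + N2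
    let p1 := pvSolveGe target K2
    let p2 := pvSolveGe (-(target - 1)) (-(K2 - 1))
    let lo := max (max 1 p1.1) p2.1
    let hi := min (min (10 ^ 6) p1.2) p2.2
    PySem.List.pyRange lo (hi + 1) 1

-- ===== PRECONDITION & SPEC =====
-- Pre_ restricts to the task's natural domain (plus the trivial N2 > M case): the target floor
-- position must be positive — at target 0 A raises ZeroDivisionError, and for negative target
-- positions (meaningless for the apartment problem) A's search window, derived assuming a
-- positive target, can miss valid xi.
def Pre_optimize_flats_per_floor_search (K2 : Int) (P2 : Int) (N2 : Int) (M : Int) : Prop :=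
  N2 > M ∨ 1 ≤ (P2 - 1) * M + N2
instance (K2 : Int) (P2 : Int) (N2 : Int) (M : Int) : Decidable (Pre_optimize_flats_per_floor_search K2 P2 N2 M) := by unfold Pre_optimize_flats_per_floor_search; infer_instance

def pvWitness_optimize_flats_per_floor_search : Int × Int × Int × Int := (7, 2, 1, 3)

-- When N2 ≤ M and the target floor position is 0, A raises ZeroDivisionError ('//' by zero); B returns the solution of the inequalities there.
def Raises_optimize_flats_per_floor_search (K2 : Int) (P2 : Int) (N2 : Int) (M : Int) : Prop :=
  N2 ≤ M ∧ (P2 - 1) * M + N2 = 0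
instance (K2 : Int) (P2 : Int) (N2 : Int) (M : Int) : Decidable (Raises_optimize_flats_per_floor_search K2 P2 N2 M) := by unfold Raises_optimize_flats_per_floor_search; infer_instance
def pvRaiseWitness_optimize_flats_per_floor_search : Int × Int × Int × Int := (1, 1, 0, 0)
def pvRaiseWitnessOut_optimize_flats_per_floor_search : List Int := []

def Spec_optimize_flats_per_floor_search (K2 : Int) (P2 : Int) (N2 : Int) (M : Int) (out : List Int) : Prop := out = optimize_flats_per_floor_search_alt K2 P2 N2 M
instance (K2 : Int) (P2 : Int) (N2 : Int) (M : Int) (out : List Int) : Decidable (Spec_optimize_flats_per_floor_search K2 P2 N2 M out) := by unfold Spec_optimize_flats_per_floor_search; infer_instance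

-- ===== CLAIM (what is proved, stated in full; the proofs are below) =====
def Claim_equal_optimize_flats_per_floor_search : Prop := ∀ (K2 : Int) (P2 : Int) (N2 : Int) (M : Int), Dom_optimize_flats_per_floor_search K2 P2 N2 M → Pre_optimize_flats_per_floor_search K2 P2 N2 M → Spec_optimize_flats_per_floor_search K2 P2 N2 M (optimize_flats_per_floor_search K2 P2 N2 M)

def Claim_raises_optimize_flats_per_floor_search : Prop := (∀ (K2 : Int) (P2 : Int) (N2 : Int) (M : Int), Dom_optimize_flats_per_floor_search K2 P2 N2 M → Raises_optimize_flats_per_floor_search K2 P2 N2 M → ¬ Pre_optimize_flats_per_floor_search K2 P2 N2 M) ∧ (Dom_optimize_flats_per_floor_search (pvRaiseWitness_optimize_flats_per_floor_search.1) (pvRaiseWitness_optimize_flats_per_floor_search.2.1) (pvRaiseWitness_optimize_flats_per_floor_search.2.2.1) (pvRaiseWitness_optimize_flats_per_floor_search.2.2.2) ∧ Raises_optimize_flats_per_floor_search (pvRaiseWitness_optimize_flats_per_floor_search.1) (pvRaiseWitness_optimize_flats_per_floor_search.2.1) (pvRaiseWitness_optimize_flats_per_floor_search.2.2.1) (pvRaiseWitness_optimize_flats_per_floor_search.2.2.2)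 ∧ optimize_flats_per_floor_search_alt (pvRaiseWitness_optimize_flats_per_floor_search.1) (pvRaiseWitness_optimize_flats_per_floor_search.2.1) (pvRaiseWitness_optimize_flats_per_floor_search.2.2.1) (pvRaiseWitness_optimize_flats_per_floor_search.2.2.2) = pvRaiseWitnessOut_optimize_flats_per_floor_search)

-- ===== LEMMAS AND PROOFS =====

-- Filtering an integer range by an interval-membership predicate yields a sub-range.
theorem filter_pyRange_interval (p : Int → Bool) (lo hi : Int) :
    ∀ (n : Nat) (a b : Int), b - a ≤ (n : Int) →
    (∀ x, a ≤ x → x < b → (p x = true ↔ lo ≤ x ∧ x ≤ hi)) →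
    (PySem.List.pyRange a b 1).filter p = PySem.List.pyRange (max a lo) (min b (hi + 1)) 1 := by
  intro n
  induction n with
  | zero =>
    intro a b hb _
    rw [PySem.List.pyRange_one_eq_nil (by omega), PySem.List.pyRange_one_eq_nil (by omega)]
    rfl
  | succ n ih =>
    intro a b hb hp
    by_cases hab : b ≤ a
    · rw [PySem.List.pyRange_one_eq_nil hab, PySem.List.pyRange_one_eq_nil (by omega)]
      rfl
    · replace hab : a < b := by omega
      rw [PySem.List.pyRange_one_cons hab, List.filter_cons]
      have hrest := ih (a + 1) b (by omega)
        (fun x hx1 hx2 => hp x (by omega) hx2)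
      by_cases hpa : p a = true
      · have hmem := (hp a le_rfl hab).mp hpa
        rw [if_pos hpa, hrest]
        have h1 : max a lo = a := by omega
        have h2 : max (a + 1) lo = a + 1 := by omega
        have h3 : a < min b (hi + 1) := by omega
        rw [h1, h2, PySem.List.pyRange_one_cons h3]
      · have hnot : ¬ (lo ≤ a ∧ a ≤ hi) := fun h => hpa ((hp a le_rfl hab).mpr h)
        rw [if_neg hpa, hrest]
        by_cases hlo : a < lo
        · congr 1; omega
        · have hhi : hi < a := by omega
          rw [PySem.List.pyRange_one_eq_nil (by omega), PySem.List.pyRange_one_eq_nil (by omega)]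

-- For xi > 0, the loop body's ceiling test is the interval condition on K2.
theorem ceil_test (K2 t xi : Int) (hxi : 0 < xi) :
    (PySem.Int.floordiv (K2 + xi - 1) xi == t) = true ↔ (t - 1) * xi < K2 ∧ K2 ≤ t * xi := by
  rw [beq_iff_eq, PySem.Int.floordiv_eq_iff_of_pos hxi]
  have h1 : (t - 1) * xi = t * xi - xi := by ring
  have h2 : (t + 1) * xi = t * xi + xi := by ring
  omega

-- ceiling division: (a-1)//b + 1 = -((-a)//b) for b > 0
theorem floordiv_pred_add_one (a b : Int) (hb : 0 < b) :
    PySem.Int.floordiv (a - 1) b + 1 = -(PySem.Int.floordiv (-a) b) := by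
  have h := (PySem.Int.floordiv_eq_iff_of_pos (a := a - 1) (b := b) hb).mp rfl
  symm
  rw [PySem.Int.neg_floordiv_neg_eq_iff_of_pos hb]
  constructor <;> nlinarith [h.1, h.2]

-- numerator monotonicity of floordiv, positive divisor
theorem floordiv_mono_num (a b : Int) (hb : 0 < b) :
    PySem.Int.floordiv (a - 1) b ≤ PySem.Int.floordiv a b := by
  have h1 := (PySem.Int.floordiv_eq_iff_of_pos (a := a - 1) (b := b) hb).mp rfl
  have h2 := (PySem.Int.floordiv_eq_iff_of_pos (a := a) (b := b) hb).mp rfl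
  nlinarith [h1.1, h2.2]

theorem optimize_flats_per_floor_search_spec : Claim_equal_optimize_flats_per_floor_search := by
  intro K2 P2 N2 M _ hpre
  unfold Spec_optimize_flats_per_floor_search
  unfold optimize_flats_per_floor_search optimize_flats_per_floor_search_alt
  by_cases hNM : N2 > M
  · simp [hNM]
  · rw [if_neg hNM, if_neg hNM]
    have ht1 : 1 ≤ (P2 - 1) * M + N2 := by
      rcases hpre with h | h
      · exact absurd h hNM
      · exact h
    rw [PySem.List.foldl_append_if_eq_filter, List.nil_append]
    simp only []
    by_cases htgt : (P2 - 1) * M + N2 > 1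
    · -- target ≥ 2: both inequalities give nontrivial bounds
      generalize hT : (P2 - 1) * M + N2 = t at *
      have hpos : (0 : Int) < t := by omega
      have hpos' : (0 : Int) < t - 1 := by omega
      have hp1 : pvSolveGe t K2 = (-(PySem.Int.floordiv (-K2) t), 10 ^ 6) := by
        unfold pvSolveGe; rw [if_pos hpos]
      have hp2 : pvSolveGe (-(t - 1)) (-(K2 - 1)) = (1, PySem.Int.floordiv (K2 - 1) (t - 1)) := by
        unfold pvSolveGe
        rw [if_neg (by omega), if_pos (by omega)]
        rw [show (-(K2 - 1)) = -(K2 - 1) from rfl, ← PySem.Int.floordiv_neg_neg (K2 - 1) (t - 1)]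
      rw [if_pos htgt, hp1, hp2]
      simp only []
      set L := max 1 (PySem.Int.floordiv (K2 - 1) t + 1) with hL
      set U := min (PySem.Int.floordiv K2 (t - 1)) (10 ^ 6) with hU
      set lo1 := -(PySem.Int.floordiv (-K2) t) with hlo1
      set hi2 := PySem.Int.floordiv (K2 - 1) (t - 1) with hhi2
      have hceil : PySem.Int.floordiv (K2 - 1) t + 1 = lo1 := floordiv_pred_add_one K2 t hpos
      have hmono : hi2 ≤ PySem.Int.floordiv K2 (t - 1) := floordiv_mono_num K2 (t - 1) hpos'
      have hcond : ∀ x, L ≤ x → x < U + 1 →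
          ((PySem.Int.floordiv (K2 + x - 1) x == t) = true ↔
            max (max 1 lo1) 1 ≤ x ∧ x ≤ min (min (10 ^ 6) (10 ^ 6)) hi2) := by
        intro x hx1 hx2
        have hxpos : (0 : Int) < x := by omega
        rw [ceil_test K2 t x hxpos]
        constructor
        · rintro ⟨h1, h2⟩
          have hxl : lo1 ≤ x := by
            have : -x ≤ PySem.Int.floordiv (-K2) t :=
              (PySem.Int.le_floordiv_iff_mul_le hpos).mpr (by nlinarith)
            omega
          have hxh : x ≤ hi2 :=
            (PySem.Int.le_floordiv_iff_mul_le hpos').mpr (by nlinarith)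
          exact ⟨by omega, by omega⟩
        · rintro ⟨h1, h2⟩
          have hA : -x ≤ PySem.Int.floordiv (-K2) t := by omega
          have hA' : (-x) * t ≤ -K2 := (PySem.Int.le_floordiv_iff_mul_le hpos).mp hA
          have hB : x * (t - 1) ≤ K2 - 1 := (PySem.Int.le_floordiv_iff_mul_le hpos').mp (by omega)
          exact ⟨by nlinarith, by nlinarith⟩
      rw [filter_pyRange_interval _ _ _ (U + 1 - L).toNat L (U + 1) (by omega) hcond]
      congr 1 <;> omega
    · -- target = 1
      have hteq : (P2 - 1) * M + N2 = 1 := by omega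
      rw [if_neg htgt, hteq]
      have hd1 : PySem.Int.floordiv (K2 - 1) 1 = K2 - 1 := by
        rw [PySem.Int.floordiv_eq_iff_of_pos (by norm_num)]; constructor <;> nlinarith
      have hdm : PySem.Int.floordiv (-K2) 1 = -K2 := by
        rw [PySem.Int.floordiv_eq_iff_of_pos (by norm_num)]; constructor <;> nlinarith
      have hp1 : pvSolveGe 1 K2 = (K2, 10 ^ 6) := by
        unfold pvSolveGe; rw [if_pos (by norm_num), hdm]; norm_num
      rw [hp1]
      by_cases hK2 : K2 ≤ 0
      · have hp2 : pvSolveGe (-(1 - 1)) (-(K2 - 1)) = (1, 0) := by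
          unfold pvSolveGe
          rw [if_neg (by norm_num), if_neg (by norm_num), if_neg (by omega)]
        rw [hp2]
        simp only [hd1]
        have hcond : ∀ x, max 1 (K2 - 1 + 1) ≤ x → x < min (10 ^ 6) (10 ^ 6) + 1 →
            ((PySem.Int.floordiv (K2 + x - 1) x == 1) = true ↔ (2 : Int) ≤ x ∧ x ≤ 0) := by
          intro x hx1 hx2
          have hxpos : (0 : Int) < x := by omega
          rw [ceil_test K2 1 x hxpos]
          constructor
          · rintro ⟨h1, h2⟩; omega
          · rintro ⟨h1, h2⟩; omega
        rw [filter_pyRange_interval _ _ _ (10 ^ 6 : Nat) _ _ (by omega) hcond]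
        rw [PySem.List.pyRange_one_eq_nil (by omega), PySem.List.pyRange_one_eq_nil (by omega)]
      · have hp2 : pvSolveGe (-(1 - 1)) (-(K2 - 1)) = (1, 10 ^ 6) := by
          unfold pvSolveGe
          rw [if_neg (by norm_num), if_neg (by norm_num), if_pos (by omega)]
        rw [hp2]
        simp only [hd1]
        have hcond : ∀ x, max 1 (K2 - 1 + 1) ≤ x → x < min (10 ^ 6) (10 ^ 6) + 1 →
            ((PySem.Int.floordiv (K2 + x - 1) x == 1) = true ↔
              max (max 1 K2) 1 ≤ x ∧ x ≤ min (min (10 ^ 6) (10 ^ 6)) (10 ^ 6)) := by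
          intro x hx1 hx2
          have hxpos : (0 : Int) < x := by omega
          rw [ceil_test K2 1 x hxpos]
          constructor
          · rintro ⟨h1, h2⟩; refine ⟨by omega, by omega⟩
          · rintro ⟨h1, h2⟩; exact ⟨by omega, by omega⟩
        rw [filter_pyRange_interval _ _ _ (10 ^ 6 : Nat) _ _ (by omega) hcond]
        congr 1 <;> omega

@[simp]
theorem optimize_flats_per_floor_search_raises : Claim_raises_optimize_flats_per_floor_search := by
  unfold Claim_raises_optimize_flats_per_floor_search
  constructor
  · intro K2 P2 N2 M _ hr hpre
    rcases hr with ⟨h1, h2⟩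
    rcases hpre with h | h <;> omega
  · exact ⟨by decide, by decide, by decide⟩
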